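-- pv_equiv track=rewrite | github.com/VVVAlex/yyy | common.py | cal_rgb
-- ===== SOURCE A (Python) =====
-- def cal_rgb(ampl: int) -> int:
--     """Высичлить цвет по амплитуде"""
--     if not ampl:
--         return 0x00
--     rgb = (0x14, 0x2C, 0x3E, 0x4E, 0x60, 0x72, 0x80, 0x90, 0xA0, 0xB6, 0xD0, 0xFF)
--     a = (11, 23, 45, 75, 111, 222, 330, 496, 740, 1100, 1480, 4096)
--     for i, j in enumerate(a):
--         if ampl <= j:
--             return rgb[i]
--     return 0x00
-- ===== SOURCE B (Python) =====
-- from bisect import bisect_left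
--
-- def cal_rgb(ampl: int) -> int:
--     """Высичлить цвет по амплитуде"""
--     if not ampl:
--         return 0x00
--     rgb = (0x14, 0x2C, 0x3E, 0x4E, 0x60, 0x72, 0x80, 0x90, 0xA0, 0xB6, 0xD0, 0xFF)
--     a = (11, 23, 45, 75, 111, 222, 330, 496, 740, 1100, 1480, 4096)
--     i = bisect_left(a, ampl)
--     return rgb[i] if i < len(rgb) else 0x00
-- ===== Notes on version B (the rewrite author's own statement) =====
-- stated objective: idiomatic
-- what changed: The sequential enumerate scan over the threshold table is replaced by bisect.bisect_left (binary search over the sorted thresholds) followed by a single bounds-checked table lookup.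
import Mathlib
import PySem

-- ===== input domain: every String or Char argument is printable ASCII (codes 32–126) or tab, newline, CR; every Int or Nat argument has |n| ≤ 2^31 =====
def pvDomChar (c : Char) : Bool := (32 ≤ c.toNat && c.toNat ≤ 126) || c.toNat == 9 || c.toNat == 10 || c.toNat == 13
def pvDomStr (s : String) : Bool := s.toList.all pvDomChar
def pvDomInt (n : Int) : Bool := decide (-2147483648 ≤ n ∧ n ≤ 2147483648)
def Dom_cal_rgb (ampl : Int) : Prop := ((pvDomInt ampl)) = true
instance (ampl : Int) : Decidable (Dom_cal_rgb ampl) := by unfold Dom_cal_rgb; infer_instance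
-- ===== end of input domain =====

-- B replaces A's sequential threshold scan with a binary search (bisect_left) over the
-- sorted threshold table (objective: idiomatic); same return value for every int input.

-- ===== PORT A =====
-- A's enumerate loop: first (i, j) with ampl ≤ j yields rgb[i]; falls off the end → 0x00.
-- rgb[i] is ported as (pyGet? rgb i).getD 0: 0 ≤ i < 12 = len(rgb) always holds for indices produced
-- by enumerate(a) (len(a) = 12), so the Python index never raises and pyGet? is some; exact here.
def calRgbScan (ampl : Int) (rgb : List Int) : List (Int × Int) → Int
  | [] => 0x00
  | (i, j) :: rest => if ampl ≤ j then (PySem.List.pyGet? rgb i).getD 0 else calRgbScan ampl rgb rest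

def cal_rgb (ampl : Int) : Int :=
  if ampl = 0 then 0x00
  else
    let rgb : List Int := [0x14, 0x2C, 0x3E, 0x4E, 0x60, 0x72, 0x80, 0x90, 0xA0, 0xB6, 0xD0, 0xFF]
    let a : List Int := [11, 23, 45, 75, 111, 222, 330, 496, 740, 1100, 1480, 4096]
    calRgbScan ampl rgb (PySem.List.enumerate a)

-- ===== PORT B =====
-- Literal port of bisect.bisect_left(a, x): binary search narrowing [lo, hi);
-- fuel = |a| bounds the iteration count (hi - lo halves each step, so |a| steps suffice).
-- a[mid] is ported as a.getD mid 0: mid < len(a) always holds inside the loop, so exact.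
def bisectGo (a : List Int) (x : Int) : Nat → Nat → Nat → Nat
  | 0, lo, _ => lo
  | f + 1, lo, hi =>
    if lo < hi then
      let mid := (lo + hi) / 2
      if a.getD mid 0 < x then bisectGo a x f (mid + 1) hi else bisectGo a x f lo mid
    else lo

def bisectLeft (a : List Int) (x : Int) : Nat := bisectGo a x a.length 0 a.length

def cal_rgb_alt (ampl : Int) : Int :=
  if ampl = 0 then 0x00
  else
    let rgb : List Int := [0x14, 0x2C, 0x3E, 0x4E, 0x60, 0x72, 0x80, 0x90, 0xA0, 0xB6, 0xD0, 0xFF]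
    let a : List Int := [11, 23, 45, 75, 111, 222, 330, 496, 740, 1100, 1480, 4096]
    let i := bisectLeft a ampl
    if i < rgb.length then rgb.getD i 0 else 0x00

-- ===== PRECONDITION & SPEC =====
def Spec_cal_rgb (ampl : Int) (out : Int) : Prop := out = cal_rgb_alt ampl
instance (ampl : Int) (out : Int) : Decidable (Spec_cal_rgb ampl out) := by unfold Spec_cal_rgb; infer_instance

-- ===== CLAIM (what is proved, stated in full; the proofs are below) =====
def Claim_equal_cal_rgb : Prop := ∀ (ampl : Int), Dom_cal_rgb ampl → Spec_cal_rgb ampl (cal_rgb ampl)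

-- ===== LEMMAS AND PROOFS =====

-- common normal form both ports are reduced to (proof helper only)
def rgbChain (ampl : Int) : Int :=
  if ampl ≤ 11 then 20 else if ampl ≤ 23 then 44 else if ampl ≤ 45 then 62 else
  if ampl ≤ 75 then 78 else if ampl ≤ 111 then 96 else if ampl ≤ 222 then 114 else
  if ampl ≤ 330 then 128 else if ampl ≤ 496 then 144 else if ampl ≤ 740 then 160 else
  if ampl ≤ 1100 then 182 else if ampl ≤ 1480 then 208 else if ampl ≤ 4096 then 255 else 0

theorem cal_rgb_eval (ampl : Int) (h : ¬ ampl = 0) : cal_rgb ampl = rgbChain ampl := by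
  simp only [cal_rgb, if_neg h]
  simp [calRgbScan, PySem.List.enumerate, PySem.List.pyGet?, PySem.List.pyIdx?, rgbChain]

set_option maxHeartbeats 4000000 in
theorem cal_rgb_alt_eval (ampl : Int) (h : ¬ ampl = 0) : cal_rgb_alt ampl = rgbChain ampl := by
  simp only [cal_rgb_alt, if_neg h]
  simp [bisectLeft, bisectGo, List.getD]
  by_cases h0 : ampl ≤ 11
  · rw [if_neg (show ¬ (330:Int) < ampl by omega)]
    rw [if_neg (show ¬ (75:Int) < ampl by omega)]
    rw [if_neg (show ¬ (23:Int) < ampl by omega)]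
    rw [if_neg (show ¬ (11:Int) < ampl by omega)]
    norm_num
    unfold rgbChain
    split_ifs <;> omega
  by_cases h1 : ampl ≤ 23
  · rw [if_neg (show ¬ (330:Int) < ampl by omega)]
    rw [if_neg (show ¬ (75:Int) < ampl by omega)]
    rw [if_neg (show ¬ (23:Int) < ampl by omega)]
    rw [if_pos (show (11:Int) < ampl by omega)]
    norm_num
    unfold rgbChain
    split_ifs <;> omega
  by_cases h2 : ampl ≤ 45
  · rw [if_neg (show ¬ (330:Int) < ampl by omega)]
    rw [if_neg (show ¬ (75:Int) < ampl by omega)]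
    rw [if_pos (show (23:Int) < ampl by omega)]
    rw [if_neg (show ¬ (45:Int) < ampl by omega)]
    norm_num
    unfold rgbChain
    split_ifs <;> omega
  by_cases h3 : ampl ≤ 75
  · rw [if_neg (show ¬ (330:Int) < ampl by omega)]
    rw [if_neg (show ¬ (75:Int) < ampl by omega)]
    rw [if_pos (show (23:Int) < ampl by omega)]
    rw [if_pos (show (45:Int) < ampl by omega)]
    norm_num
    unfold rgbChain
    split_ifs <;> omega
  by_cases h4 : ampl ≤ 111
  · rw [if_neg (show ¬ (330:Int) < ampl by omega)]
    rw [if_pos (show (75:Int) < ampl by omega)]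
    rw [if_neg (show ¬ (222:Int) < ampl by omega)]
    rw [if_neg (show ¬ (111:Int) < ampl by omega)]
    norm_num
    unfold rgbChain
    split_ifs <;> omega
  by_cases h5 : ampl ≤ 222
  · rw [if_neg (show ¬ (330:Int) < ampl by omega)]
    rw [if_pos (show (75:Int) < ampl by omega)]
    rw [if_neg (show ¬ (222:Int) < ampl by omega)]
    rw [if_pos (show (111:Int) < ampl by omega)]
    norm_num
    unfold rgbChain
    split_ifs <;> omega
  by_cases h6 : ampl ≤ 330
  · rw [if_neg (show ¬ (330:Int) < ampl by omega)]
    rw [if_pos (show (75:Int) < ampl by omega)]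
    rw [if_pos (show (222:Int) < ampl by omega)]
    norm_num
    unfold rgbChain
    split_ifs <;> omega
  by_cases h7 : ampl ≤ 496
  · rw [if_pos (show (330:Int) < ampl by omega)]
    rw [if_neg (show ¬ (1100:Int) < ampl by omega)]
    rw [if_neg (show ¬ (740:Int) < ampl by omega)]
    rw [if_neg (show ¬ (496:Int) < ampl by omega)]
    norm_num
    unfold rgbChain
    split_ifs <;> omega
  by_cases h8 : ampl ≤ 740
  · rw [if_pos (show (330:Int) < ampl by omega)]
    rw [if_neg (show ¬ (1100:Int) < ampl by omega)]
    rw [if_neg (show ¬ (740:Int) < ampl by omega)]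
    rw [if_pos (show (496:Int) < ampl by omega)]
    norm_num
    unfold rgbChain
    split_ifs <;> omega
  by_cases h9 : ampl ≤ 1100
  · rw [if_pos (show (330:Int) < ampl by omega)]
    rw [if_neg (show ¬ (1100:Int) < ampl by omega)]
    rw [if_pos (show (740:Int) < ampl by omega)]
    norm_num
    unfold rgbChain
    split_ifs <;> omega
  by_cases h10 : ampl ≤ 1480
  · rw [if_pos (show (330:Int) < ampl by omega)]
    rw [if_pos (show (1100:Int) < ampl by omega)]
    rw [if_neg (show ¬ (4096:Int) < ampl by omega)]
    rw [if_neg (show ¬ (1480:Int) < ampl by omega)]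
    norm_num
    unfold rgbChain
    split_ifs <;> omega
  by_cases h11 : ampl ≤ 4096
  · rw [if_pos (show (330:Int) < ampl by omega)]
    rw [if_pos (show (1100:Int) < ampl by omega)]
    rw [if_neg (show ¬ (4096:Int) < ampl by omega)]
    rw [if_pos (show (1480:Int) < ampl by omega)]
    norm_num
    unfold rgbChain
    split_ifs <;> omega
  -- ampl > 4096
  rw [if_pos (show (330:Int) < ampl by omega)]
  rw [if_pos (show (1100:Int) < ampl by omega)]
  rw [if_pos (show (4096:Int) < ampl by omega)]
  norm_num
  unfold rgbChain
  split_ifs <;> omega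

-- ===== VERDICT (by name: the statement is the Claim_ definition above) =====
theorem cal_rgb_spec : Claim_equal_cal_rgb := by
  intro ampl _
  unfold Spec_cal_rgb
  by_cases h : ampl = 0
  · simp [cal_rgb, cal_rgb_alt, h]
  · rw [cal_rgb_eval ampl h, cal_rgb_alt_eval ampl h]
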